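-- pv_equiv track=rewrite | github.com/camerongilbert/Basic-Bioinformatics-Tools | BasicMethods.py | makeAgencyList
-- ===== SOURCE A (Python) =====
-- def makeAgencyList(INseqs):
-- #takes in a dictionary of sequences with names and generates an agency list
--     agencyList = []
--     for word in INseqs:
--         for word2 in INseqs:
--             if word != word2:
--                 if INseqs[word][-3:] == INseqs[word2][0:3]:
--                     agencyList.append(word+ ' '+ word2)
--     return agencyList
-- ===== SOURCE B (Python) =====
-- def makeAgencyList(INseqs):
--     # index words by the 3-char prefix of their sequence, then look up each suffix
--     byPrefix = {}
--     for word2, seq2 in INseqs.items():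
--         key = seq2[0:3]
--         byPrefix[key] = byPrefix.get(key, []) + [word2]
--     agencyList = []
--     for word, seq in INseqs.items():
--         for word2 in byPrefix.get(seq[-3:], []):
--             if word2 != word:
--                 agencyList.append(word + ' ' + word2)
--     return agencyList
-- ===== Notes on version B (the rewrite author's own statement) =====
-- stated objective: faster
-- what changed: A compares every key pair (nested loops over the dict); B builds a dict indexing words by the 3-char prefix of their sequence in one pass, then for each word looks up its 3-char suffix, so only actual matches are visited.
import Mathlib
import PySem

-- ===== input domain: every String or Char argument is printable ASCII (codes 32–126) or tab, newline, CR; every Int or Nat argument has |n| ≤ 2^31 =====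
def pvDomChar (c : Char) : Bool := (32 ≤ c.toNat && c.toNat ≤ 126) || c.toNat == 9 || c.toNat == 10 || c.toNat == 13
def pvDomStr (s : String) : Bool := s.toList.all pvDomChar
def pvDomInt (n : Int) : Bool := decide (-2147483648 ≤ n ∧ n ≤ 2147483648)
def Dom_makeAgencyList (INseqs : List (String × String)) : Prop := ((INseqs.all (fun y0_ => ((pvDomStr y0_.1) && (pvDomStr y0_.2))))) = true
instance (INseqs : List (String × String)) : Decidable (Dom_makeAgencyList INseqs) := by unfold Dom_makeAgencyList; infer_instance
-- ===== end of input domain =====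

-- B replaces A's all-pairs key scan by a dict that indexes words by the 3-char prefix of their
-- sequence and then looks up each word's 3-char suffix once.

-- ===== PORT A =====
def makeAgencyList (INseqs : List (String × String)) : List String :=
  let d := PySem.Dict.ofList INseqs
  d.keys.foldl (fun agencyList word =>
    d.keys.foldl (fun agencyList word2 =>
      if word ≠ word2 then
        if PySem.Str.slice (d.getD word "") (some (-3)) none
            = PySem.Str.slice (d.getD word2 "") none (some 3) then
          agencyList ++ [word ++ " " ++ word2]
        else agencyList
      else agencyList) agencyList) []

-- ===== PORT B =====
def makeAgencyList_alt (INseqs : List (String × String)) : List String :=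
  let d := PySem.Dict.ofList INseqs
  let byPrefix : PySem.Dict String (List String) :=
    d.items.foldl
      (fun byPrefix p => byPrefix.modify (PySem.Str.slice p.2 none (some 3)) [] (· ++ [p.1]))
      PySem.Dict.empty
  d.items.foldl (fun agencyList p =>
    (byPrefix.getD (PySem.Str.slice p.2 (some (-3)) none) []).foldl
      (fun agencyList word2 =>
        if word2 ≠ p.1 then agencyList ++ [p.1 ++ " " ++ word2] else agencyList)
      agencyList) []

-- ===== PRECONDITION & SPEC =====
def Spec_makeAgencyList (INseqs : List (String × String)) (out : List String) : Prop := out = makeAgencyList_alt INseqs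
instance (INseqs : List (String × String)) (out : List String) : Decidable (Spec_makeAgencyList INseqs out) := by unfold Spec_makeAgencyList; infer_instance

-- ===== CLAIM (what is proved, stated in full; the proofs are below) =====
def Claim_equal_makeAgencyList : Prop := ∀ (INseqs : List (String × String)), Dom_makeAgencyList INseqs → Spec_makeAgencyList INseqs (makeAgencyList INseqs)

-- ===== LEMMAS AND PROOFS =====

-- the common normal form both loops are reduced to: for each item p, in item order, the words q
-- (in item order, q's key ≠ p's key) whose 3-char sequence prefix equals p's 3-char suffix
def pvPairs (items : List (String × String)) : List String :=
  items.flatMap (fun p =>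
    (items.filter (fun q =>
        decide (p.1 ≠ q.1) && decide (PySem.Str.slice p.2 (some (-3)) none
                                       = PySem.Str.slice q.2 none (some 3)))).map
      (fun q => p.1 ++ " " ++ q.1))

theorem portA_eq_pvPairs (d : PySem.Dict String String) (hnd : d.keys.Nodup) :
    d.keys.foldl (fun agencyList word =>
      d.keys.foldl (fun agencyList word2 =>
        if word ≠ word2 then
          if PySem.Str.slice (d.getD word "") (some (-3)) none
              = PySem.Str.slice (d.getD word2 "") none (some 3) then
            agencyList ++ [word ++ " " ++ word2]
          else agencyList
        else agencyList) agencyList) []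
    = pvPairs d.items := by
  have hinner : ∀ (word : String) (acc : List String),
      d.keys.foldl (fun agencyList word2 =>
        if word ≠ word2 then
          if PySem.Str.slice (d.getD word "") (some (-3)) none
              = PySem.Str.slice (d.getD word2 "") none (some 3) then
            agencyList ++ [word ++ " " ++ word2]
          else agencyList
        else agencyList) acc
      = acc ++ (d.keys.filter (fun word2 =>
            decide (word ≠ word2) && decide (PySem.Str.slice (d.getD word "") (some (-3)) none
                = PySem.Str.slice (d.getD word2 "") none (some 3)))).map
          (fun word2 => word ++ " " ++ word2) := by
    intro word acc
    have hf : (fun (agencyList : List String) word2 =>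
        if word ≠ word2 then
          if PySem.Str.slice (d.getD word "") (some (-3)) none
              = PySem.Str.slice (d.getD word2 "") none (some 3) then
            agencyList ++ [word ++ " " ++ word2]
          else agencyList
        else agencyList)
      = (fun agencyList word2 =>
          if (decide (word ≠ word2) && decide (PySem.Str.slice (d.getD word "") (some (-3)) none
                = PySem.Str.slice (d.getD word2 "") none (some 3))) = true then
            agencyList ++ [word ++ " " ++ word2]
          else agencyList) := by
      funext a w2
      by_cases h1 : word = w2 <;>
        by_cases h2 : PySem.Str.slice (d.getD word "") (some (-3)) none
            = PySem.Str.slice (d.getD w2 "") none (some 3) <;> simp [h1, h2]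
    rw [hf, PySem.List.foldl_append_if]
  have houter : (fun (agencyList : List String) word =>
      d.keys.foldl (fun agencyList word2 =>
        if word ≠ word2 then
          if PySem.Str.slice (d.getD word "") (some (-3)) none
              = PySem.Str.slice (d.getD word2 "") none (some 3) then
            agencyList ++ [word ++ " " ++ word2]
          else agencyList
        else agencyList) agencyList)
    = (fun agencyList word => agencyList ++ ((d.keys.filter (fun word2 =>
            decide (word ≠ word2) && decide (PySem.Str.slice (d.getD word "") (some (-3)) none
                = PySem.Str.slice (d.getD word2 "") none (some 3)))).map
          (fun word2 => word ++ " " ++ word2))) := funext fun a => funext fun w => hinner w a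
  rw [houter, PySem.List.foldl_append_eq_flatMap, List.nil_append]
  have hkeys : d.keys = d.items.map (·.1) := rfl
  rw [hkeys, List.flatMap_map]
  unfold pvPairs
  apply List.flatMap_congr
  intro p hp
  have hgp : d.getD p.1 "" = p.2 :=
    PySem.Dict.getD_of_mem_items d (show (p.1, p.2) ∈ d.items from hp) hnd ""
  simp only [List.filter_map, List.map_map, hgp]
  congr 1
  apply List.filter_congr
  intro q hq
  have hgq : d.getD q.1 "" = q.2 :=
    PySem.Dict.getD_of_mem_items d (show (q.1, q.2) ∈ d.items from hq) hnd ""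
  simp [hgq]

theorem portB_eq_pvPairs (d : PySem.Dict String String) :
    d.items.foldl (fun agencyList p =>
      ((d.items.foldl
        (fun byPrefix p => byPrefix.modify (PySem.Str.slice p.2 none (some 3)) [] (· ++ [p.1]))
        PySem.Dict.empty).getD (PySem.Str.slice p.2 (some (-3)) none) []).foldl
        (fun agencyList word2 =>
          if word2 ≠ p.1 then agencyList ++ [p.1 ++ " " ++ word2] else agencyList)
        agencyList) []
    = pvPairs d.items := by
  have hidx : ∀ s : String,
      (d.items.foldl
        (fun byPrefix p => byPrefix.modify (PySem.Str.slice p.2 none (some 3)) [] (· ++ [p.1]))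
        PySem.Dict.empty).getD s []
      = (d.items.filter (fun q => PySem.Str.slice q.2 none (some 3) == s)).map (·.1) := by
    intro s
    rw [show d.items.foldl
        (fun byPrefix p => byPrefix.modify (PySem.Str.slice p.2 none (some 3)) [] (· ++ [p.1]))
        PySem.Dict.empty
      = (d.items.map (fun q => (PySem.Str.slice q.2 none (some 3), q.1))).foldl
        (fun byPrefix p => byPrefix.modify p.1 [] (· ++ [p.2])) PySem.Dict.empty from
      by rw [List.foldl_map]]
    rw [PySem.Dict.getD_foldl_modify_append]
    simp [List.filter_map, List.map_map, PySem.Dict.getD_empty, Function.comp_def]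
  have hinner : ∀ (p : String × String) (L : List String) (acc : List String),
      L.foldl (fun agencyList word2 =>
          if word2 ≠ p.1 then agencyList ++ [p.1 ++ " " ++ word2] else agencyList) acc
      = acc ++ (L.filter (fun word2 => decide (word2 ≠ p.1))).map
          (fun word2 => p.1 ++ " " ++ word2) := by
    intro p L acc
    exact PySem.List.foldl_append_ite (fun word2 => word2 ≠ p.1) _ _ _
  have houter : (fun (agencyList : List String) (p : String × String) =>
      ((d.items.foldl
        (fun byPrefix p => byPrefix.modify (PySem.Str.slice p.2 none (some 3)) [] (· ++ [p.1]))
        PySem.Dict.empty).getD (PySem.Str.slice p.2 (some (-3)) none) []).foldl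
        (fun agencyList word2 =>
          if word2 ≠ p.1 then agencyList ++ [p.1 ++ " " ++ word2] else agencyList)
        agencyList)
    = (fun agencyList p => agencyList ++
        (((d.items.filter (fun q => PySem.Str.slice q.2 none (some 3)
              == PySem.Str.slice p.2 (some (-3)) none)).map (·.1)).filter
            (fun word2 => decide (word2 ≠ p.1))).map (fun word2 => p.1 ++ " " ++ word2)) := by
    funext acc p
    rw [hinner, hidx]
  rw [houter, PySem.List.foldl_append_eq_flatMap, List.nil_append]
  unfold pvPairs
  apply List.flatMap_congr
  intro p hp
  rw [List.filter_map, List.map_map, List.filter_filter]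
  congr 1
  apply List.filter_congr
  intro q hq
  simp only [Function.comp_apply]
  rw [show decide (q.1 ≠ p.1) = decide (p.1 ≠ q.1) from decide_eq_decide.mpr ne_comm,
      Bool.beq_eq_decide_eq,
      show decide (PySem.Str.slice q.2 none (some 3) = PySem.Str.slice p.2 (some (-3)) none)
          = decide (PySem.Str.slice p.2 (some (-3)) none = PySem.Str.slice q.2 none (some 3)) from
        decide_eq_decide.mpr eq_comm]

-- ===== VERDICT (by name: the statement is the Claim_ definition above) =====
theorem makeAgencyList_spec : Claim_equal_makeAgencyList := by
  intro INseqs _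
  unfold Spec_makeAgencyList makeAgencyList makeAgencyList_alt
  rw [portA_eq_pvPairs (PySem.Dict.ofList INseqs) (PySem.Dict.nodup_keys_ofList INseqs),
      portB_eq_pvPairs (PySem.Dict.ofList INseqs)]
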